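-- pv_equiv track=rewrite | github.com/amathias42/Python_Projects | network/change_eth_ip.py | bitmask_to_netmask
-- ===== SOURCE A (Python) =====
-- def bitmask_to_netmask(bitmask):
--     """Converts a CIDR notation bitmask to a quad-dotted notation subnet mask.
--
--     Args:
--         bitmask: CIDR notation bitmask. int [0-32]
--
--     Returns:
--         A string representing the CIDR bitmask in quad-dotted notation"""
--     bitmask = int(bitmask)
--     bitmaskBinary = ""
--
--     for _ in range(32):
--         if bitmask > 0:
--             bitmaskBinary = bitmaskBinary + "1"
--             bitmask = bitmask - 1
--         else:
--             bitmaskBinary = bitmaskBinary + "0"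
--
--     h1 = bitmaskBinary[: len(bitmaskBinary) // 2]
--     h2 = bitmaskBinary[len(bitmaskBinary) // 2 :]
--
--     q1 = h1[: len(h1) // 2]
--     q2 = h1[len(h1) // 2 :]
--     q3 = h2[: len(h2) // 2]
--     q4 = h2[len(h2) // 2 :]
--
--     netmask = (
--         str(int(q1, 2))
--         + "."
--         + str(int(q2, 2))
--         + "."
--         + str(int(q3, 2))
--         + "."
--         + str(int(q4, 2))
--     )
--     return netmask
-- ===== SOURCE B (Python) =====
-- def bitmask_to_netmask(bitmask):
--     """Converts a CIDR notation bitmask to a quad-dotted notation subnet mask."""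
--     n = min(max(int(bitmask), 0), 32)
--     mask = (0xFFFFFFFF << (32 - n)) & 0xFFFFFFFF
--     return ".".join(str((mask >> s) & 255) for s in (24, 16, 8, 0))
-- ===== Notes on version B (the rewrite author's own statement) =====
-- stated objective: idiomatic
-- what changed: Replaces the 32-iteration character-by-character binary-string build, string slicing and base-2 reparsing with a closed-form integer mask computed by shift-and-mask arithmetic, from which the four octets are extracted directly.
import Mathlib
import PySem

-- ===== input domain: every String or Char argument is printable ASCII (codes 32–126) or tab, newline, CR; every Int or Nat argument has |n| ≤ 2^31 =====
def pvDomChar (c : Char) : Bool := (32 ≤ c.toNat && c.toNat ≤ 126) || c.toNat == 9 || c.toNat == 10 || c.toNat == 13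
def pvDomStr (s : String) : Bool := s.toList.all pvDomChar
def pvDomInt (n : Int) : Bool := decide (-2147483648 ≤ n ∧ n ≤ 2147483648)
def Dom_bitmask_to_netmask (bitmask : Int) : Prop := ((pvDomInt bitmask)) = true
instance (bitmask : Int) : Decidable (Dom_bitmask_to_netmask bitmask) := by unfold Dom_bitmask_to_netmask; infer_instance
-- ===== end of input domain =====

-- B replaces A's 32-iteration binary-string construction, slicing and base-2 reparsing with
-- closed-form 32-bit mask arithmetic (shift, &0xFFFFFFFF, per-octet shift-and-mask).

-- ===== PORT A =====
-- A's 'for _ in range(32)' loop: fuel counts the remaining iterations; the growing Python str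
-- bitmaskBinary is carried as a List Char (strings are ported on the code-point list side)
def pvLoopA : Nat → Int → List Char → List Char
  | 0, _, s => s
  | k+1, b, s => if b > 0 then pvLoopA k (b - 1) (s ++ ['1']) else pvLoopA k b (s ++ ['0'])

-- int(q, 2); its ValueError case is unreachable here (A only passes strings of '0'/'1')
def pvInt2 (q : List Char) : Int := (PySem.Int.ofCharsBase? q 2).getD 0

def bitmask_to_netmask (bitmask : Int) : String :=
  let bl : List Char := pvLoopA 32 bitmask []
  -- slices s[:len//2] / s[len//2:] with nonnegative bounds: take/drop are exact
  let h1 := bl.take (bl.length / 2)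
  let h2 := bl.drop (bl.length / 2)
  let q1 := h1.take (h1.length / 2)
  let q2 := h1.drop (h1.length / 2)
  let q3 := h2.take (h2.length / 2)
  let q4 := h2.drop (h2.length / 2)
  -- the final str concatenation, assembled on the list side and packed into a String once
  String.ofList (PySem.Int.toChars (pvInt2 q1) ++ ['.'] ++ PySem.Int.toChars (pvInt2 q2) ++
    ['.'] ++ PySem.Int.toChars (pvInt2 q3) ++ ['.'] ++ PySem.Int.toChars (pvInt2 q4))

-- ===== PORT B =====
-- B's clamp n = min(max(int(bitmask), 0), 32)
def pvClampB (b : Int) : Int := min (max b 0) 32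
-- Python's '<<' / '>>' on int are exactly *2^k / floor-div by 2^k; '&' is PySem.Int.band
def bitmask_to_netmask_alt (bitmask : Int) : String :=
  let n := pvClampB bitmask
  let mask : Int := PySem.Int.band (0xFFFFFFFF * 2 ^ (32 - n).toNat) 0xFFFFFFFF
  String.ofList (PySem.Chars.join ['.'] (([24, 16, 8, 0] : List Nat).map
    (fun s => PySem.Int.toChars (PySem.Int.band (PySem.Int.floordiv mask (2 ^ s)) 255))))

-- ===== PRECONDITION & SPEC =====
def Spec_bitmask_to_netmask (bitmask : Int) (out : String) : Prop := out = bitmask_to_netmask_alt bitmask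
instance (bitmask : Int) (out : String) : Decidable (Spec_bitmask_to_netmask bitmask out) := by unfold Spec_bitmask_to_netmask; infer_instance

-- ===== CLAIM (what is proved, stated in full; the proofs are below) =====
def Claim_equal_bitmask_to_netmask : Prop := ∀ (bitmask : Int), Dom_bitmask_to_netmask bitmask → Spec_bitmask_to_netmask bitmask (bitmask_to_netmask bitmask)

-- ===== LEMMAS AND PROOFS =====

-- A's loop output only depends on its counter clamped to [0, fuel]
theorem pvLoopA_clamp (k : Nat) : ∀ (b : Int) (s : List Char),
    pvLoopA k b s = pvLoopA k (min (max b 0) k) s := by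
  induction k with
  | zero => intro b s; rfl
  | succ k ih =>
    intro b s
    by_cases hb : b > 0
    · have h2 : min (max b 0) ((k : Int) + 1) > 0 := by
        simp only [gt_iff_lt, lt_min_iff]
        exact ⟨by omega, by positivity⟩
      have hcast : ((k + 1 : Nat) : Int) = (k : Int) + 1 := by push_cast; ring
      simp only [pvLoopA, if_pos hb, hcast, if_pos h2]
      rw [ih (b - 1), ih (min (max b 0) ((k : Int) + 1) - 1)]
      congr 1
      omega
    · have hcast : ((k + 1 : Nat) : Int) = (k : Int) + 1 := by push_cast; ring
      have h2 : ¬ (min (max b 0) ((k : Int) + 1) > 0) := by omega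
      simp only [pvLoopA, if_neg hb, hcast, if_neg h2]
      rw [ih b, ih (min (max b 0) ((k : Int) + 1))]
      congr 1
      omega

theorem portA_clamp (b : Int) :
    bitmask_to_netmask b = bitmask_to_netmask (pvClampB b) := by
  unfold bitmask_to_netmask
  rw [pvLoopA_clamp 32 b, pvLoopA_clamp 32 (pvClampB b)]
  have : min (max (pvClampB b) 0) ((32 : Nat) : Int) = min (max b 0) ((32 : Nat) : Int) := by
    unfold pvClampB; push_cast; omega
  rw [this]

theorem portB_clamp (b : Int) :
    bitmask_to_netmask_alt b = bitmask_to_netmask_alt (pvClampB b) := by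
  unfold bitmask_to_netmask_alt
  have : pvClampB (pvClampB b) = pvClampB b := by unfold pvClampB; omega
  rw [this]

theorem agree_on_range (m : Int) (h0 : 0 ≤ m) (h32 : m ≤ 32) :
    bitmask_to_netmask m = bitmask_to_netmask_alt m := by
  have h : ∀ (l r : List Char), l = r → String.ofList l = String.ofList r := by
    intro l r h; rw [h]
  unfold bitmask_to_netmask bitmask_to_netmask_alt
  apply h
  interval_cases m <;> decide

-- ===== VERDICT (by name: the statement is the Claim_ definition above) =====
theorem bitmask_to_netmask_spec : Claim_equal_bitmask_to_netmask := by
  intro b _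
  unfold Spec_bitmask_to_netmask
  rw [portA_clamp b, portB_clamp b]
  exact agree_on_range _ (by unfold pvClampB; omega) (by unfold pvClampB; omega)
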